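-- pv_equiv track=rewrite | github.com/heatherbooker/sentimentAnalysis | assignmentThree.py | searchTweet
-- ===== SOURCE A (Python) =====
-- def searchTweet(tweet, keysAndValues) :
-- 	if not tweet:
-- 		return False
-- 	keywords = keysAndValues[0]
-- 	values = keysAndValues[1]
-- 	wordsFound = []
-- 	happiness = 0
-- 	for index, word in enumerate(keywords):
-- 		if word in tweet:
-- 			wordsFound.append(word)
-- 			happiness += values[index]
-- 	return(happiness)
-- ===== SOURCE B (Python) =====
-- def searchTweet(tweet, keysAndValues):
--     if not tweet:
--         return False
--     # Aggregate the value of each keyword (duplicates summed) into a hash map,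
--     # then scan the tweet once per distinct keyword length: every window of that
--     # length is looked up in the map, each distinct substring counted once.
--     weight = {}
--     for w, v in zip(keysAndValues[0], keysAndValues[1]):
--         weight[w] = weight.get(w, 0) + v
--     total = 0
--     for L in sorted({len(w) for w in weight}):
--         seen = set()
--         for i in range(len(tweet) - L + 1):
--             sub = tweet[i:i + L]
--             if sub not in seen:
--                 seen.add(sub)
--                 total += weight.get(sub, 0)
--     return total
-- ===== Notes on version B (the rewrite author's own statement) =====
-- stated objective: faster
-- what changed: Instead of testing each keyword against the tweet one by one, B aggregates keyword values into a hash map (summing duplicates), then slides a window over the tweet once per distinct keyword length and looks each distinct window up in the map.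
-- outside the precondition, e.g. on searchTweet('', (['a'], [1])): A returns False, B returns False; on searchTweet('hi', (['x', 'hi'], [5])): A raises IndexError, B returns 0
import Mathlib
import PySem

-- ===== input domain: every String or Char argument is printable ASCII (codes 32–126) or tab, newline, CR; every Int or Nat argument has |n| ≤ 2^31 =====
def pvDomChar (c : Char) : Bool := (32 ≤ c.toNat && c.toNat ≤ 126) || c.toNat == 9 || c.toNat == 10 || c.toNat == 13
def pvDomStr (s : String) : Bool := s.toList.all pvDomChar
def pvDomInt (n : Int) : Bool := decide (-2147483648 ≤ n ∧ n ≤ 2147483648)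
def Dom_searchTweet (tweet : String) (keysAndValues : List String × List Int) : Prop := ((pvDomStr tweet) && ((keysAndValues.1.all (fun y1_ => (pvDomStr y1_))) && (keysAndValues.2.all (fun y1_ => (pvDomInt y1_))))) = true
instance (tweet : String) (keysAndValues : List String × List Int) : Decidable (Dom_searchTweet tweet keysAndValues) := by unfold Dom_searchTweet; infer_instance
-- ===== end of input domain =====

-- ===== PORT A =====
-- B replaces A's per-keyword scan of the tweet by a staged hash-map algorithm: aggregate
-- keyword weights into a dict, then slide a window over the tweet once per distinct keyword
-- length, looking each distinct window up in the dict (objective: faster, measured).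
def searchTweet (tweet : String) (keysAndValues : List String × List Int) : Int :=
  if tweet.toList = [] then 0   -- A returns False here (not an int); excluded by Pre_
  else
    let keywords := keysAndValues.1
    let values := keysAndValues.2
    let st := (PySem.List.enumerate keywords 0).foldl
      (fun (st : List String × Int) (p : Int × String) =>
        if PySem.Str.isIn p.2 tweet then
          (st.1 ++ [p.2], st.2 + PySem.List.pyGetD values p.1 0)
        else st)
      ([], 0)
    st.2

-- ===== PORT B =====
-- Strings are handled on their character lists (the PySem-exact representation).
def searchTweet_alt (tweet : String) (keysAndValues : List String × List Int) : Int :=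
  if tweet.toList = [] then 0
  else
    let t := tweet.toList
    let weight : PySem.Dict (List Char) Int :=
      (keysAndValues.1.zip keysAndValues.2).foldl
        (fun d p => d.insert p.1.toList (d.getD p.1.toList 0 + p.2))
        PySem.Dict.empty
    let lengths : List Nat :=
      PySem.List.sorted (PySem.Set.ofList (weight.keys.map (fun w => w.length))) (fun x => x) false
    lengths.foldl
      (fun (total : Int) (L : Nat) =>
        ((PySem.List.pyRange 0 ((t.length : Int) - (L : Int) + 1) 1).foldl
          (fun (st : PySem.Set (List Char) × Int) i =>
            let sub := PySem.List.slice t (some i) (some (i + (L : Int)))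
            if PySem.Set.contains st.1 sub then st
            else (PySem.Set.add st.1 sub, st.2 + weight.getD sub 0))
          (PySem.Set.empty, total)).2)
      0

-- ===== PRECONDITION & SPEC =====
-- Pre_ excludes (a) the empty tweet, on which A returns False, a bool, not a value of the
-- declared int return type, and (b) inputs where some keyword present in the tweet has no
-- matching entry in the values list, on which A raises IndexError.
def Pre_searchTweet (tweet : String) (keysAndValues : List String × List Int) : Prop :=
  tweet.toList ≠ [] ∧
  ∀ k < keysAndValues.1.length,
    PySem.Str.isIn (keysAndValues.1.getD k "") tweet = true → k < keysAndValues.2.length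
instance (tweet : String) (keysAndValues : List String × List Int) : Decidable (Pre_searchTweet tweet keysAndValues) := by unfold Pre_searchTweet; infer_instance

def pvWitness_searchTweet : String × (List String × List Int) := ("abc", (["a", "x"], [2, 3]))

def Spec_searchTweet (tweet : String) (keysAndValues : List String × List Int) (out : Int) : Prop := out = searchTweet_alt tweet keysAndValues
instance (tweet : String) (keysAndValues : List String × List Int) (out : Int) : Decidable (Spec_searchTweet tweet keysAndValues out) := by unfold Spec_searchTweet; infer_instance

-- ===== CLAIM (what is proved, stated in full; the proofs are below) =====
def Claim_equal_searchTweet : Prop := ∀ (tweet : String) (keysAndValues : List String × List Int), Dom_searchTweet tweet keysAndValues → Pre_searchTweet tweet keysAndValues → Spec_searchTweet tweet keysAndValues (searchTweet tweet keysAndValues)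

-- ===== LEMMAS AND PROOFS =====

-- A's loop state is a pair; its second component accumulates a sum over the enumerated list.
lemma searchTweet_foldl_snd (q : String → Bool) (values : List Int) :
    ∀ (l : List (Int × String)) (acc : List String × Int),
      (l.foldl
        (fun (st : List String × Int) (p : Int × String) =>
          if q p.2 then
            (st.1 ++ [p.2], st.2 + PySem.List.pyGetD values p.1 0)
          else st) acc).2
      = acc.2 + (l.map (fun p => if q p.2 then PySem.List.pyGetD values p.1 0 else 0)).sum := by
  intro l
  induction l with
  | nil => intro acc; simp
  | cons p l ih =>
    intro acc
    simp only [List.foldl_cons, List.map_cons, List.sum_cons]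
    cases hq : q p.2 with
    | false => simp [ih]
    | true => simp only [if_true, ih]; ring

-- Summing values[i] over enumerate-indices equals summing the paired value over zip,
-- provided every matching keyword's index is inside the values list.
lemma searchTweet_enum_eq_zip (q : String → Bool) :
    ∀ (ks : List String) (vs values : List Int) (s : ℕ),
      (∀ k < ks.length, q (ks.getD k "") = true → k < vs.length) →
      (∀ k < vs.length, values.getD (s + k) 0 = vs.getD k 0) →
      ((PySem.List.enumerate ks (s : Int)).map
          (fun p => if q p.2 then PySem.List.pyGetD values p.1 0 else 0)).sum
      = ((ks.zip vs).map (fun p => if q p.1 then p.2 else 0)).sum := by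
  intro ks
  induction ks with
  | nil => intro vs values s _ _; simp [PySem.List.enumerate]
  | cons w ks ih =>
    intro vs values s h1 h2
    rw [PySem.List.enumerate_cons]
    have hcast : (s : Int) + 1 = ((s + 1 : ℕ) : Int) := by push_cast; ring
    cases vs with
    | nil =>
      have hw : q w = false := by
        cases hb : q w with
        | false => rfl
        | true =>
          have := h1 0 (by simp) (by simpa using hb)
          simp at this
      have htail :
          ∀ k < ks.length, q (ks.getD k "") = true → k < ([] : List Int).length := by
        intro k hk hin
        have := h1 (k + 1) (by simp; omega) (by simpa using hin)
        simp at this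
      have hrec := ih [] values (s + 1) htail (by intro k hk; simp at hk)
      rw [hcast]
      simp only [List.map_cons, List.sum_cons, hrec]
      simp [hw]
    | cons v vs =>
      have hhead : PySem.List.pyGetD values (s : Int) 0 = v := by
        rw [PySem.List.pyGetD_natCast]
        have := h2 0 (by simp)
        simpa using this
      have htail : ∀ k < ks.length, q (ks.getD k "") = true → k < vs.length := by
        intro k hk hin
        have := h1 (k + 1) (by simp; omega) (by simpa using hin)
        simp at this
        omega
      have htail2 : ∀ k < vs.length, values.getD (s + 1 + k) 0 = vs.getD k 0 := by
        intro k hk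
        have h3 := h2 (k + 1) (by simp; omega)
        rw [show s + 1 + k = s + (k + 1) from by omega]
        simpa using h3
      have hrec := ih vs values (s + 1) htail htail2
      rw [hcast]
      simp only [List.map_cons, List.sum_cons, List.zip_cons_cons, hrec, hhead]

-- B's weight dict looks up to the summed values of the equal keywords (duplicates grouped).
lemma searchTweet_getD_weight (l : List (String × Int)) (w : List Char) :
    ∀ (d : PySem.Dict (List Char) Int),
      (l.foldl (fun d p => d.insert p.1.toList (d.getD p.1.toList 0 + p.2)) d).getD w 0
      = d.getD w 0 + ((l.filter (fun p => p.1.toList = w)).map (·.2)).sum := by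
  induction l with
  | nil => intro d; simp
  | cons p l ih =>
    intro d
    simp only [List.foldl_cons, List.filter_cons, ih]
    by_cases hw : p.1.toList = w
    · simp [hw]
      ring
    · simp [PySem.Dict.getD_insert, hw, Ne.symm hw]

lemma foldl_body_sum (body : Int → ℕ → Int) (S : ℕ → Int)
    (h : ∀ a L, body a L = a + S L) :
    ∀ (xs : List ℕ) (a0 : Int), xs.foldl body a0 = a0 + (xs.map S).sum := by
  intro xs
  induction xs with
  | nil => intro a0; simp
  | cons x xs ih =>
    intro a0
    rw [List.foldl_cons, h, ih]
    simp
    ring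

lemma seen_foldl {α : Type} [BEq α] [LawfulBEq α] [DecidableEq α] (f : α → Int) (xs : List α) :
    ∀ (s : PySem.Set α) (t0 : Int),
      (xs.foldl
        (fun (st : PySem.Set α × Int) x =>
          if PySem.Set.contains st.1 x then st
          else (PySem.Set.add st.1 x, st.2 + f x)) (s, t0))
      = (PySem.Set.update s xs,
         t0 + ∑ x ∈ xs.toFinset \ s.toFinset, f x) := by
  induction xs with
  | nil => intro s t0; simp [PySem.Set.update]
  | cons x xs ih =>
    intro s t0
    rw [List.foldl_cons, PySem.Set.update_cons]
    by_cases hc : x ∈ s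
    · have hcc : PySem.Set.contains s x = true := by
        simp [PySem.Set.contains_eq_listContains]; exact hc
      rw [if_pos hcc, PySem.Set.add_of_mem hc, ih s t0]
      congr 2
      have hiff : (x :: xs).toFinset \ s.toFinset = xs.toFinset \ s.toFinset := by
        ext y
        simp only [List.toFinset_cons, Finset.mem_sdiff, Finset.mem_insert, List.mem_toFinset]
        constructor
        · rintro ⟨hy | hy, hns⟩
          · exact absurd (hy ▸ hc) (by simpa using hns)
          · exact ⟨hy, hns⟩
        · rintro ⟨hy, hns⟩; exact ⟨Or.inr hy, hns⟩
      rw [hiff]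
    · have hcc : PySem.Set.contains s x = false := by
        simp [PySem.Set.contains_eq_listContains]; exact hc
      rw [if_neg (by simp only [hcc]; exact Bool.false_ne_true), PySem.Set.add_of_not_mem hc,
        ih (s ++ [x]) (t0 + f x)]
      congr 1
      have hset : (x :: xs).toFinset \ s.toFinset
          = insert x (xs.toFinset \ (s ++ [x]).toFinset) := by
        ext y
        simp only [List.toFinset_cons, Finset.mem_sdiff, Finset.mem_insert, List.mem_toFinset,
          List.toFinset_append, Finset.mem_union, List.toFinset_nil]
        by_cases hyx : y = x
        · subst hyx; simp [hc]
        · simp only [hyx, false_or]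
          tauto
      rw [hset, Finset.sum_insert (by simp)]
      ring

-- B evaluated to a sum of per-length window sums
lemma alt_eval (tweet : String) (kv : List String × List Int) (hne : tweet.toList ≠ [])
    (weight : PySem.Dict (List Char) Int)
    (hw : weight = (kv.1.zip kv.2).foldl
        (fun d p => d.insert p.1.toList (d.getD p.1.toList 0 + p.2)) PySem.Dict.empty) :
    searchTweet_alt tweet kv
    = ((PySem.List.sorted (PySem.Set.ofList (weight.keys.map (fun w => w.length))) (fun x => x) false).map
        (fun (L : ℕ) => ∑ s ∈ ((PySem.List.pyRange 0 ((tweet.toList.length : Int) - (L : Int) + 1) 1).map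
            (fun i => PySem.List.slice tweet.toList (some i) (some (i + (L : Int))))).toFinset,
          weight.getD s 0)).sum := by
  subst hw
  unfold searchTweet_alt
  rw [if_neg hne]
  exact Eq.trans (foldl_body_sum
      (fun (total : Int) (L : Nat) =>
        ((PySem.List.pyRange 0 ((tweet.toList.length : Int) - (L : Int) + 1) 1).foldl
          (fun (st : PySem.Set (List Char) × Int) i =>
            let sub := PySem.List.slice tweet.toList (some i) (some (i + (L : Int)))
            if PySem.Set.contains st.1 sub then st
            else (PySem.Set.add st.1 sub, st.2 + ((kv.1.zip kv.2).foldl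
              (fun d p => d.insert p.1.toList (d.getD p.1.toList 0 + p.2))
              PySem.Dict.empty).getD sub 0))
          (PySem.Set.empty, total)).2)
      (fun L => ∑ s ∈ ((PySem.List.pyRange 0 ((tweet.toList.length : Int) - (L : Int) + 1) 1).map
            (fun i => PySem.List.slice tweet.toList (some i) (some (i + (L : Int))))).toFinset,
          ((kv.1.zip kv.2).foldl
            (fun d p => d.insert p.1.toList (d.getD p.1.toList 0 + p.2))
            PySem.Dict.empty).getD s 0) (by
  intro a L
  beta_reduce
  rw [show (PySem.List.pyRange 0 ((tweet.toList.length : Int) - (L : Int) + 1) 1).foldl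
        (fun (st : PySem.Set (List Char) × Int) i =>
          let sub := PySem.List.slice tweet.toList (some i) (some (i + (L : Int)))
          if PySem.Set.contains st.1 sub then st
          else (PySem.Set.add st.1 sub, st.2 + ((kv.1.zip kv.2).foldl
            (fun d p => d.insert p.1.toList (d.getD p.1.toList 0 + p.2))
            PySem.Dict.empty).getD sub 0))
        (PySem.Set.empty, a)
      = ((PySem.List.pyRange 0 ((tweet.toList.length : Int) - (L : Int) + 1) 1).map
          (fun i => PySem.List.slice tweet.toList (some i) (some (i + (L : Int))))).foldl
        (fun (st : PySem.Set (List Char) × Int) x =>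
          if PySem.Set.contains st.1 x then st
          else (PySem.Set.add st.1 x, st.2 + ((kv.1.zip kv.2).foldl
            (fun d p => d.insert p.1.toList (d.getD p.1.toList 0 + p.2))
            PySem.Dict.empty).getD x 0))
        (PySem.Set.empty, a) from by rw [List.foldl_map]]
  rw [seen_foldl (fun x => ((kv.1.zip kv.2).foldl
      (fun d p => d.insert p.1.toList (d.getD p.1.toList 0 + p.2))
      PySem.Dict.empty).getD x 0)
    ((PySem.List.pyRange 0 ((tweet.toList.length : Int) - (L : Int) + 1) 1).map
      (fun i => PySem.List.slice tweet.toList (some i) (some (i + (L : Int)))))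
    PySem.Set.empty a]
  simp [PySem.Set.empty]) _ 0) (zero_add _)

lemma window_mem (t : List Char) (L : ℕ) (w : List Char) :
    (w ∈ (PySem.List.pyRange 0 ((t.length : Int) - (L : Int) + 1) 1).map
        (fun i => PySem.List.slice t (some i) (some (i + (L : Int)))))
    ↔ (w.length = L ∧ PySem.Chars.isIn w t = true) := by
  rw [List.mem_map]
  constructor
  · rintro ⟨i, hi, hw⟩
    rw [PySem.List.mem_pyRange_one] at hi
    obtain ⟨hi0, hi1⟩ := hi
    set j : ℕ := i.toNat with hj
    have hij : i = (j : Int) := by omega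
    have hjL : j + L ≤ t.length := by omega
    rw [hij, PySem.List.slice_natCast_add] at hw
    have hlen : ((t.drop j).take L).length = L := by
      simp [List.length_take, List.length_drop]
      omega
    refine ⟨hw ▸ hlen, ?_⟩
    rw [← PySem.Chars.exists_prefix_drop_iff_isIn]
    exact ⟨j, hw ▸ List.take_prefix L (t.drop j)⟩
  · rintro ⟨hlen, hin⟩
    rw [← PySem.Chars.exists_prefix_drop_iff_isIn] at hin
    obtain ⟨j, hpre⟩ := hin
    by_cases hjn : j ≤ t.length - L ∧ L ≤ t.length
    · refine ⟨(j : Int), ?_, ?_⟩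
      · rw [PySem.List.mem_pyRange_one]
        constructor
        · omega
        · omega
      · rw [PySem.List.slice_natCast_add]
        rw [List.prefix_iff_eq_take] at hpre
        rw [hlen] at hpre
        exact hpre.symm
    · -- w is a prefix of t.drop j but does not fit: then w = [] and L = 0 works at i = 0
      have hwlen : w.length ≤ t.length - j := by
        have := hpre.length_le
        simp [List.length_drop] at this
        omega
      have hLn : L ≤ t.length - j := hlen ▸ hwlen
      have hj : t.length < j := by omega
      have hL0 : L = 0 := by omega
      have hw0 : w = [] := by
        have : t.length - j = 0 := by omega
        have := hwlen
        apply List.eq_nil_of_length_eq_zero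
        omega
      refine ⟨0, ?_, ?_⟩
      · rw [PySem.List.mem_pyRange_one]
        constructor
        · omega
        · omega
      · have : (0 : Int) = ((0 : ℕ) : Int) := rfl
        rw [this, PySem.List.slice_natCast_add]
        simp [hL0, hw0]

lemma sum_ite_eq' {α : Type} [DecidableEq α] (l : List α) (hl : l.Nodup)
    (a : α) (f : α → Int) :
    (l.map (fun y => if a = y then f y else 0)).sum = if a ∈ l then f a else 0 := by
  induction l with
  | nil => simp
  | cons x l ih =>
    simp only [List.nodup_cons] at hl
    simp only [List.map_cons, List.sum_cons, List.mem_cons]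
    by_cases hx : a = x
    · subst hx
      simp [ih hl.2, hl.1]
    · simp [hx, ih hl.2]

lemma group_by {κ π : Type} [DecidableEq κ] (K : List κ) (hK : K.Nodup)
    (l : List π) (key : π → κ) (g : π → Int) (hall : ∀ p ∈ l, key p ∈ K) :
    (K.map (fun w => ((l.filter (fun p => key p = w)).map g).sum)).sum = (l.map g).sum := by
  induction l with
  | nil => simp
  | cons p l ih =>
    have hmem : key p ∈ K := hall p (by simp)
    have ih' := ih (fun q hq => hall q (by simp [hq]))
    calc (K.map (fun w => (((p :: l).filter (fun q => key q = w)).map g).sum)).sum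
        = (K.map (fun w => (if key p = w then g p else 0)
            + ((l.filter (fun q => key q = w)).map g).sum)).sum := by
          apply congrArg
          apply List.map_congr_left
          intro w _
          by_cases h : key p = w
          · simp [h]
          · simp [h]
      _ = (l.map g).sum + g p := by
          rw [PySem.List.sum_map_add_int, ih', sum_ite_eq' K hK (key p) (fun _ => g p),
            if_pos hmem]
          ring
      _ = ((p :: l).map g).sum := by simp; ring


-- ===== VERDICT (by name: the statement is the Claim_ definition above) =====
theorem searchTweet_spec : Claim_equal_searchTweet := by
  intro tweet kv _hdom hpre
  obtain ⟨hne, hidx⟩ := hpre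
  unfold Spec_searchTweet
  -- A evaluated to a sum over the zipped pairs
  have hA : searchTweet tweet kv
      = ((kv.1.zip kv.2).map (fun p => if PySem.Str.isIn p.1 tweet then p.2 else 0)).sum := by
    unfold searchTweet
    rw [if_neg hne]
    rw [searchTweet_foldl_snd (fun w => PySem.Str.isIn w tweet) kv.2
          (PySem.List.enumerate kv.1 0) ([], 0)]
    have h := searchTweet_enum_eq_zip (fun w => PySem.Str.isIn w tweet) kv.1 kv.2 kv.2 0
      hidx (by intro k hk; simp)
    simpa using h
  rw [hA, alt_eval tweet kv hne _ rfl]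
  set pairs := kv.1.zip kv.2 with hpairs
  set weight := pairs.foldl
      (fun d p => d.insert p.1.toList (d.getD p.1.toList 0 + p.2)) PySem.Dict.empty
    with hweight
  set K := weight.keys with hKdef
  set occ := fun w : List Char => PySem.Chars.isIn w tweet.toList with hocc
  set F := fun w : List Char =>
      ((pairs.filter (fun p => p.1.toList = w)).map (·.2)).sum with hF
  have hW : ∀ s, weight.getD s 0 = F s := by
    intro s
    rw [hweight, searchTweet_getD_weight]
    simp [hF]
  have hKeq : K = PySem.Set.ofList (pairs.map (fun p => p.1.toList)) := by
    rw [hKdef, hweight, PySem.Dict.keys_foldl_insert_key]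
    simp [PySem.Set.update_nil_left]
  have hKnodup : K.Nodup := by
    rw [hKeq]; exact PySem.Set.nodup_ofList _
  set lengths := PySem.List.sorted (PySem.Set.ofList (K.map (fun w => w.length)))
      (fun x => x) false with hlen
  have hlnodup : lengths.Nodup :=
    List.Pairwise.imp (fun h => Nat.ne_of_lt h) (PySem.List.sorted_ofList_pairwise_lt _)
  have hlmem : ∀ w ∈ K, w.length ∈ lengths := by
    intro w hw
    rw [hlen, PySem.List.mem_sorted, PySem.Set.mem_ofList]
    exact List.mem_map_of_mem hw
  have hall : ∀ p ∈ pairs, p.1.toList ∈ K := by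
    intro p hp
    rw [hKeq]
    exact (PySem.Set.mem_ofList _ _).mpr (List.mem_map_of_mem hp)
  have hF0 : ∀ s, s ∉ K → F s = 0 := by
    intro s hs
    rw [hF]
    have hfil : pairs.filter (fun p => p.1.toList = s) = [] := by
      apply List.filter_eq_nil_iff.mpr
      intro p hp
      simp only [decide_eq_true_eq]
      intro heq
      exact hs (heq ▸ hall p hp)
    simp [hfil]
  have hWL : ∀ L : ℕ,
      (∑ s ∈ ((PySem.List.pyRange 0 ((tweet.toList.length : Int) - (L : Int) + 1) 1).map
          (fun i => PySem.List.slice tweet.toList (some i) (some (i + (L : Int))))).toFinset,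
        weight.getD s 0)
      = ∑ w ∈ K.toFinset, (if w.length = L ∧ occ w = true then F w else 0) := by
    intro L
    calc (∑ s ∈ ((PySem.List.pyRange 0 ((tweet.toList.length : Int) - (L : Int) + 1) 1).map
          (fun i => PySem.List.slice tweet.toList (some i) (some (i + (L : Int))))).toFinset,
          weight.getD s 0)
        = ∑ s ∈ ((PySem.List.pyRange 0 ((tweet.toList.length : Int) - (L : Int) + 1) 1).map
            (fun i => PySem.List.slice tweet.toList (some i) (some (i + (L : Int))))).toFinset,
          (if s ∈ K.toFinset then F s else 0) := by
          apply Finset.sum_congr rfl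
          intro s _
          rw [hW]
          by_cases hs : s ∈ K.toFinset
          · rw [if_pos hs]
          · rw [if_neg hs, hF0 s (fun h => hs (List.mem_toFinset.mpr h))]
      _ = ∑ s ∈ ((PySem.List.pyRange 0 ((tweet.toList.length : Int) - (L : Int) + 1) 1).map
            (fun i => PySem.List.slice tweet.toList (some i) (some (i + (L : Int))))).toFinset
            ∩ K.toFinset, F s := Finset.sum_ite_mem _ _ _
      _ = ∑ s ∈ K.toFinset ∩ ((PySem.List.pyRange 0 ((tweet.toList.length : Int) - (L : Int) + 1) 1).map
            (fun i => PySem.List.slice tweet.toList (some i) (some (i + (L : Int))))).toFinset,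
          F s := by rw [Finset.inter_comm]
      _ = ∑ w ∈ K.toFinset,
          (if w ∈ ((PySem.List.pyRange 0 ((tweet.toList.length : Int) - (L : Int) + 1) 1).map
            (fun i => PySem.List.slice tweet.toList (some i) (some (i + (L : Int))))).toFinset
           then F w else 0) := (Finset.sum_ite_mem _ _ _).symm
      _ = ∑ w ∈ K.toFinset, (if w.length = L ∧ occ w = true then F w else 0) := by
          apply Finset.sum_congr rfl
          intro w _
          congr 1
          rw [List.mem_toFinset]
          rw [eq_iff_iff]
          exact window_mem tweet.toList L w
  simp only [hWL]
  rw [← List.sum_toFinset _ hlnodup, Finset.sum_comm]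
  have hinner : ∀ w ∈ K.toFinset,
      (∑ L ∈ lengths.toFinset, if w.length = L ∧ occ w = true then F w else 0)
      = if occ w = true then F w else 0 := by
    intro w hw
    by_cases ho : occ w = true
    · simp only [ho, and_true]
      rw [Finset.sum_ite_eq]
      simp [List.mem_toFinset.mpr (hlmem w (List.mem_toFinset.mp hw))]
    · simp [ho]
  rw [Finset.sum_congr rfl hinner, List.sum_toFinset _ hKnodup]
  have hmapK : (K.map (fun w => if occ w = true then F w else 0))
      = K.map (fun w => ((pairs.filter (fun p => p.1.toList = w)).map
          (fun p => if occ p.1.toList = true then p.2 else 0)).sum) := by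
    apply List.map_congr_left
    intro w _
    by_cases ho : occ w = true
    · rw [if_pos ho, hF]
      apply congrArg
      apply List.map_congr_left
      intro p hp
      have hpw : p.1.toList = w := by simpa using (List.mem_filter.mp hp).2
      simp [hpw, ho]
    · rw [if_neg ho]
      symm
      apply List.sum_eq_zero
      intro x hx
      obtain ⟨p, hp, rfl⟩ := List.mem_map.mp hx
      have hpw : p.1.toList = w := by simpa using (List.mem_filter.mp hp).2
      simp [hpw, ho]
  rw [hmapK, group_by K hKnodup pairs (fun p => p.1.toList)
      (fun p => if occ p.1.toList = true then p.2 else 0) hall]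
  apply congrArg
  apply List.map_congr_left
  intro p _
  have : PySem.Str.isIn p.1 tweet = occ p.1.toList := by
    rw [hocc]
    simp
  rw [this]
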